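-- pv_equiv track=rewrite | github.com/brucedservice/test | draft_tool/__init__.py | summarize_rosters
-- ===== SOURCE A (Python) =====
-- from collections import defaultdict
-- from typing import Callable, Dict, List, Tuple
--
-- def summarize_rosters(rosters: Dict[int, List[Tuple[str, str]]], teams: int,
--                       roster_limits: Dict[str, int]) -> Dict[int, Dict[str, List[str]]]:
--     summaries: Dict[int, Dict[str, List[str]]] = {}
--     for team in range(teams):
--         grouped: Dict[str, List[str]] = defaultdict(list)
--         for slot, name in rosters.get(team, []):
--             grouped[slot].append(name)
--         summaries[team + 1] = {slot: grouped[slot] for slot in roster_limits if grouped.get(slot)}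
--     return summaries
-- ===== SOURCE B (Python) =====
-- def summarize_rosters(rosters, teams, roster_limits):
--     def team_summary(entries):
--         summary = {}
--         for slot in roster_limits:
--             names = [name for s, name in entries if s == slot]
--             if names:
--                 summary[slot] = names
--         return summary
--     return {team + 1: team_summary(rosters.get(team, [])) for team in range(teams)}
-- ===== Notes on version B (the rewrite author's own statement) =====
-- stated objective: simpler
-- what changed: B drops A's per-team defaultdict grouping index and instead builds each slot's name list directly by filtering the team's roster per slot in roster_limits order, keeping non-empty lists only.
import Mathlib
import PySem

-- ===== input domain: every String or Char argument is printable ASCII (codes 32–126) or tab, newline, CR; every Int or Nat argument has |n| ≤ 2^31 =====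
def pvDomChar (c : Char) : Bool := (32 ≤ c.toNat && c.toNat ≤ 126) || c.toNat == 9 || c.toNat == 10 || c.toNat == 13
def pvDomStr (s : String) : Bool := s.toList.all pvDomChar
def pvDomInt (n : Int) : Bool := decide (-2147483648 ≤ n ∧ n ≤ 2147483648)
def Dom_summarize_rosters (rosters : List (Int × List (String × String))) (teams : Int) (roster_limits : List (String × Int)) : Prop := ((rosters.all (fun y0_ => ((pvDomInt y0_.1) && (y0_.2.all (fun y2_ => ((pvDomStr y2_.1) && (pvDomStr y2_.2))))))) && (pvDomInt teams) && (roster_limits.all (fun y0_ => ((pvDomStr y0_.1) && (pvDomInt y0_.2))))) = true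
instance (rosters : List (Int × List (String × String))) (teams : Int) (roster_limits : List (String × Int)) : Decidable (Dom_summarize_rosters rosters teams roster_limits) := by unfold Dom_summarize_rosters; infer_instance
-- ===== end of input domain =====

-- B replaces A's per-team defaultdict grouping index with a direct per-slot filter of the
-- team's roster (simpler: no intermediate index), keeping key order, name order and the
-- dropping of empty slots; same asymptotic cost on typical fixed slot sets.

-- ===== PORT A =====
-- for slot, name in rosters.get(team, []): grouped[slot].append(name)   (defaultdict(list))
def pvGroupedA (entries : List (String × String)) : PySem.Dict String (List String) :=
  entries.foldl (fun g p => g.modify p.1 [] (fun xs => xs ++ [p.2])) (PySem.Dict.mk [])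

-- {slot: grouped[slot] for slot in roster_limits if grouped.get(slot)}
-- (iteration over a dict = its keys in first-occurrence order; fresh keys append)
def pvInnerA (grouped : PySem.Dict String (List String)) (roster_limits : List (String × Int)) : List (String × List String) :=
  (PySem.List.dedup (roster_limits.map (·.1))).foldl
    (fun acc slot => if !(grouped.getD slot []).isEmpty then acc ++ [(slot, grouped.getD slot [])] else acc) []

def summarize_rosters (rosters : List (Int × List (String × String))) (teams : Int) (roster_limits : List (String × Int)) : List (Int × List (String × List String)) :=
  (PySem.List.pyRange 0 teams 1).foldl
    (fun summaries team =>
      summaries ++ [(team + 1, pvInnerA (pvGroupedA ((PySem.Dict.mk rosters).getD team [])) roster_limits)])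
    []

-- ===== PORT B =====
-- team_summary: for slot in roster_limits, keep [name for s, name in entries if s == slot] when non-empty
def pvTeamSummaryB (roster_limits : List (String × Int)) (entries : List (String × String)) : List (String × List String) :=
  (PySem.List.dedup (roster_limits.map (·.1))).foldl
    (fun summary slot =>
      if !((entries.filter (fun p => p.1 == slot)).map (·.2)).isEmpty
      then summary ++ [(slot, (entries.filter (fun p => p.1 == slot)).map (·.2))] else summary) []

-- {team + 1: team_summary(rosters.get(team, [])) for team in range(teams)}  (keys team+1 are fresh)
def summarize_rosters_alt (rosters : List (Int × List (String × String))) (teams : Int) (roster_limits : List (String × Int)) : List (Int × List (String × List String)) :=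
  (PySem.List.pyRange 0 teams 1).map
    (fun team => (team + 1, pvTeamSummaryB roster_limits ((PySem.Dict.mk rosters).getD team [])))

-- ===== PRECONDITION & SPEC =====
def Spec_summarize_rosters (rosters : List (Int × List (String × String))) (teams : Int) (roster_limits : List (String × Int)) (out : List (Int × List (String × List String))) : Prop := out = summarize_rosters_alt rosters teams roster_limits
instance (rosters : List (Int × List (String × String))) (teams : Int) (roster_limits : List (String × Int)) (out : List (Int × List (String × List String))) : Decidable (Spec_summarize_rosters rosters teams roster_limits out) := by unfold Spec_summarize_rosters; infer_instance

-- ===== CLAIM (what is proved, stated in full; the proofs are below) =====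
def Claim_equal_summarize_rosters : Prop := ∀ (rosters : List (Int × List (String × String))) (teams : Int) (roster_limits : List (String × Int)), Dom_summarize_rosters rosters teams roster_limits → Spec_summarize_rosters rosters teams roster_limits (summarize_rosters rosters teams roster_limits)

-- ===== LEMMAS AND PROOFS =====
-- A's grouping index, looked up at a slot, is exactly B's per-slot filter of the entries.
theorem pvGroupedA_getD (entries : List (String × String)) (slot : String) :
    (pvGroupedA entries).getD slot [] = (entries.filter (fun p => p.1 == slot)).map (·.2) := by
  unfold pvGroupedA
  simpa using PySem.Dict.getD_foldl_modify_append entries (PySem.Dict.mk []) slot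

theorem pvInnerA_eq (entries : List (String × String)) (roster_limits : List (String × Int)) :
    pvInnerA (pvGroupedA entries) roster_limits = pvTeamSummaryB roster_limits entries := by
  unfold pvInnerA pvTeamSummaryB
  congr 1
  funext acc slot
  rw [pvGroupedA_getD]

theorem summarize_rosters_spec : Claim_equal_summarize_rosters := by
  intro rosters teams roster_limits _
  unfold Spec_summarize_rosters summarize_rosters summarize_rosters_alt
  rw [PySem.List.foldl_append_singleton_eq_map]
  simp [pvInnerA_eq]
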